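-- pv_equiv track=rewrite | github.com/desmondmcconnell/Playground | tew2.py | get_fixed_name_v2
-- ===== SOURCE A (Python) =====
-- def get_fixed_name_v2(name):
--     previous_char = ''
--     new_name = ''
--     for character in name:
--         if previous_char.islower():
--             if character.isupper():
--                 new_name += '_'
--         if previous_char == " " or previous_char == '_':
--             character = character.upper()
--         new_name += character
--         previous_char = character
--     return new_name
-- ===== SOURCE B (Python) =====
-- def get_fixed_name_v2(name):
--     # pass 1: uppercase every character that immediately follows a space or underscore
--     cap = ''.join(c.upper() if p in (' ', '_') else c
--                   for p, c in zip('\x00' + name, name))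
--     # pass 2: insert '_' wherever a lowercase character is followed by an uppercase one
--     return ''.join('_' + c if p.islower() and c.isupper() else c
--                    for p, c in zip('\x00' + cap, cap))
-- ===== Notes on version B (the rewrite author's own statement) =====
-- stated objective: simpler
-- what changed: A's single stateful loop (previous-char register with interleaved capitalize/insert decisions) is decomposed into two independent zip-with-shifted-self comprehension passes: first capitalize every character that follows a separator, then insert an underscore at each lower-to-upper boundary of the capitalized string.
import Mathlib
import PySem

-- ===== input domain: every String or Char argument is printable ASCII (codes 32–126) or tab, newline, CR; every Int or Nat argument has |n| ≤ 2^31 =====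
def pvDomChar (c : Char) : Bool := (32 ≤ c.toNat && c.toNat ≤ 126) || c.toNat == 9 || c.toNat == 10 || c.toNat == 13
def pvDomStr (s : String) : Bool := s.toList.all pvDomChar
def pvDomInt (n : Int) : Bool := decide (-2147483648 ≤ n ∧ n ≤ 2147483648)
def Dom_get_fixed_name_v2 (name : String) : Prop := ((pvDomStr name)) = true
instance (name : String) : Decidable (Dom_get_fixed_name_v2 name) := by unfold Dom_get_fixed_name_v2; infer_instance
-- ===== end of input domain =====

-- B replaces A's single stateful loop (previous-char register, interleaved tests on original vs
-- rewritten characters) by two independent passes: capitalize after separators, then insert '_'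
-- at every lower→upper boundary of the capitalized string; objective: simpler.

-- ===== PORT A =====
-- A's loop: previous_char is '' (none) before the first iteration, afterwards the character as
-- it was appended (possibly uppercased).  Each step emits the '_' (from the ORIGINAL character's
-- isupper) and then the possibly-uppercased character.
def aGo (prev : Option Char) : List Char → List Char
  | [] => []
  | c :: rest =>
    let ins : List Char :=
      if prev.elim false PySem.Chars.islower && PySem.Chars.isupper c then ['_'] else []
    let u := if prev = some ' ' || prev = some '_' then PySem.Chars.upperChar c else c
    ins ++ u :: aGo (some u) rest

def get_fixed_name_v2 (name : String) : String :=
  String.mk (aGo none name.toList)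

-- ===== PORT B =====
-- pass 1 of Source B: zip the string with itself shifted by a '\x00' sentinel; uppercase after ' '/'_'
def bPass1 (cs : List Char) : List Char :=
  (('\x00' :: cs).zip cs).map
    (fun pc => if pc.1 = ' ' || pc.1 = '_' then PySem.Chars.upperChar pc.2 else pc.2)

-- pass 2 of Source B: same zip on the capitalized string; '_'+c at each lower→upper boundary
def bPass2 (cs : List Char) : List Char :=
  (('\x00' :: cs).zip cs).flatMap
    (fun pc => if PySem.Chars.islower pc.1 && PySem.Chars.isupper pc.2 then ['_', pc.2] else [pc.2])

def get_fixed_name_v2_alt (name : String) : String :=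
  String.mk (bPass2 (bPass1 name.toList))

-- ===== PRECONDITION & SPEC =====
def Spec_get_fixed_name_v2 (name : String) (out : String) : Prop := out = get_fixed_name_v2_alt name
instance (name : String) (out : String) : Decidable (Spec_get_fixed_name_v2 name out) := by unfold Spec_get_fixed_name_v2; infer_instance

-- ===== CLAIM (what is proved, stated in full; the proofs are below) =====
def Claim_equal_get_fixed_name_v2 : Prop := ∀ (name : String), Dom_get_fixed_name_v2 name → Spec_get_fixed_name_v2 name (get_fixed_name_v2 name)

-- ===== LEMMAS AND PROOFS =====

-- recursive views of the two zip passes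
def p1go (p : Char) : List Char → List Char
  | [] => []
  | c :: r => (if p = ' ' || p = '_' then PySem.Chars.upperChar c else c) :: p1go c r

def p2go (p : Char) : List Char → List Char
  | [] => []
  | c :: r => (if PySem.Chars.islower p && PySem.Chars.isupper c then ['_', c] else [c]) ++ p2go c r

theorem bPass1_zip (cs : List Char) (p : Char) :
    ((p :: cs).zip cs).map
      (fun pc => if pc.1 = ' ' || pc.1 = '_' then PySem.Chars.upperChar pc.2 else pc.2)
      = p1go p cs := by
  induction cs generalizing p with
  | nil => rfl
  | cons c r ih =>
    rw [List.zip_cons_cons, List.map_cons, ih c]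
    rfl

theorem bPass2_zip (cs : List Char) (p : Char) :
    ((p :: cs).zip cs).flatMap
      (fun pc => if PySem.Chars.islower pc.1 && PySem.Chars.isupper pc.2 then ['_', pc.2] else [pc.2])
      = p2go p cs := by
  induction cs generalizing p with
  | nil => rfl
  | cons c r ih =>
    rw [List.zip_cons_cons, List.flatMap_cons, ih c]
    rfl

-- upperChar preserves membership in {' ', '_'}
theorem sep_up (c : Char) :
    (PySem.Chars.upperChar c = ' ' ∨ PySem.Chars.upperChar c = '_') ↔ (c = ' ' ∨ c = '_') := by
  unfold PySem.Chars.upperChar PySem.Chars.islower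
  split_ifs with h
  · simp only [Bool.and_eq_true, decide_eq_true_eq, Char.le_def,
      UInt32.le_iff_toNat_le] at h
    obtain ⟨h1, h2⟩ := h
    have h1' : 97 ≤ c.toNat := h1
    have h2' : c.toNat ≤ 122 := h2
    have hv : (c.toNat - 32).isValidChar := Or.inl (by omega)
    have ht : (Char.ofNat (c.toNat - 32)).toNat = c.toNat - 32 := by
      rw [Char.toNat_ofNat, if_pos hv]
    constructor
    · rintro (he | he) <;> exfalso <;>
      · have hx := congrArg Char.toNat he
        rw [ht] at hx
        simp only [show (' ' : Char).toNat = 32 from by decide,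
          show ('_' : Char).toNat = 95 from by decide] at hx
        omega
    · rintro (he | he) <;> subst he <;> exact absurd h1' (by decide)
  · exact Iff.rfl

-- the main invariant: A's loop with (transformed) previous character q equals
-- pass2-with-previous-q applied to pass1-with-(original)-previous-p, whenever
-- p and q agree on being a separator.
theorem main_inv (cs : List Char) (p q : Char)
    (h : (q = ' ' ∨ q = '_') ↔ (p = ' ' ∨ p = '_')) :
    aGo (some q) cs = p2go q (p1go p cs) := by
  induction cs generalizing p q with
  | nil => rfl
  | cons c r ih =>
    by_cases hp : p = ' ' ∨ p = '_'
    · have hq : q = ' ' ∨ q = '_' := h.mpr hp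
      have hlq : PySem.Chars.islower q = false := by
        rcases hq with hq | hq <;> subst hq <;> decide
      have hqs : (decide ((some q : Option Char) = some ' ') ||
          decide ((some q : Option Char) = some '_')) = true := by
        rcases hq with hq | hq <;> subst hq <;> decide
      have hpb : (decide (p = ' ') || decide (p = '_')) = true := by
        rcases hp with hp | hp <;> subst hp <;> decide
      simp only [aGo, p1go, p2go, Option.elim_some, hlq, Bool.false_and, Bool.false_eq_true,
        if_false, hqs, hpb, if_true, List.nil_append, List.singleton_append]
      exact congrArg _ (ih c (PySem.Chars.upperChar c) (sep_up c))
    · have hq : ¬ (q = ' ' ∨ q = '_') := fun hh => hp (h.mp hh)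
      have hqs : (decide ((some q : Option Char) = some ' ') ||
          decide ((some q : Option Char) = some '_')) = false := by
        rw [Bool.or_eq_false_iff]
        exact ⟨decide_eq_false (by simp; exact fun hh => hq (Or.inl hh)),
               decide_eq_false (by simp; exact fun hh => hq (Or.inr hh))⟩
      have hpb : (decide (p = ' ') || decide (p = '_')) = false := by
        rw [Bool.or_eq_false_iff]
        exact ⟨decide_eq_false (fun hh => hp (Or.inl hh)),
               decide_eq_false (fun hh => hp (Or.inr hh))⟩
      simp only [aGo, p1go, p2go, Option.elim_some, hqs, hpb, Bool.false_eq_true, if_false]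
      rw [ih c c Iff.rfl]
      by_cases hc : (PySem.Chars.islower q && PySem.Chars.isupper c) = true <;> simp [hc]

-- first step: previous_char = '' behaves like the '\x00' sentinel
theorem start_eq (cs : List Char) : aGo none cs = p2go '\x00' (p1go '\x00' cs) := by
  cases cs with
  | nil => rfl
  | cons c r =>
    have h0 : (decide ('\x00' = ' ') || decide ('\x00' = '_')) = false := by decide
    have h0s : (decide ((none : Option Char) = some ' ') ||
        decide ((none : Option Char) = some '_')) = false := by decide
    have h0l : PySem.Chars.islower '\x00' = false := by decide
    simp only [aGo, p1go, p2go, Option.elim_none, h0l, h0, h0s, Bool.false_and,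
      Bool.false_eq_true, if_false, List.nil_append, List.singleton_append]
    exact congrArg _ (main_inv r c c Iff.rfl)

-- ===== VERDICT (by name: the statement is the Claim_ definition above) =====
theorem get_fixed_name_v2_spec : Claim_equal_get_fixed_name_v2 := by
  intro name _
  unfold Spec_get_fixed_name_v2 get_fixed_name_v2 get_fixed_name_v2_alt bPass1 bPass2
  rw [bPass1_zip, bPass2_zip, start_eq]
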